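-- pv_equiv track=rewrite | github.com/ai-cherry/sophia-intel-ai | app/orchestrators/sophia_unified.py | _merge_data_records
-- ===== SOURCE A (Python) =====
-- def _merge_data_records(primary: dict, secondary: dict, resolution_strategy: str) -> dict:
--     """Merge data records according to resolution strategy"""
--     merged = primary.copy()
--
--     for key, value in secondary.items():
--         if key not in merged:
--             merged[key] = value
--         else:
--             # Apply conflict resolution
--             if resolution_strategy == "most_recent_wins":
--                 # Assume secondary is more recent
--                 merged[key] = value
--             elif resolution_strategy == "highest_confidence":
--                 # Would compare confidence scores
--                 pass
--             elif resolution_strategy == "source_priority":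
--                 # Primary source wins
--                 pass
--
--     return merged
-- ===== SOURCE B (Python) =====
-- def _merge_data_records(primary: dict, secondary: dict, resolution_strategy: str) -> dict:
--     """Staged merge: build a per-key winning-value index (iterating forward for
--     most_recent_wins so later entries win, backward otherwise so earlier entries win),
--     then emit keys in first-occurrence order with their winning values."""
--     items = list(primary.items()) + list(secondary.items())
--     source = items if resolution_strategy == "most_recent_wins" else reversed(items)
--     winner = {}
--     for k, v in source:
--         winner[k] = v
--     merged = {}
--     for k, _ in items:
--         if k not in merged:
--             merged[k] = winner[k]
--     return merged
-- ===== Notes on version B (the rewrite author's own statement) =====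
-- stated objective: alternative
-- what changed: Replaces A's single merge loop with per-key strategy branching by a staged algorithm: concatenate both item lists, build a winning-value index in one pass (forward iteration for most_recent_wins so later entries win, reversed iteration otherwise so earlier entries win), then emit keys in first-occurrence order from the index.
import Mathlib
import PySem

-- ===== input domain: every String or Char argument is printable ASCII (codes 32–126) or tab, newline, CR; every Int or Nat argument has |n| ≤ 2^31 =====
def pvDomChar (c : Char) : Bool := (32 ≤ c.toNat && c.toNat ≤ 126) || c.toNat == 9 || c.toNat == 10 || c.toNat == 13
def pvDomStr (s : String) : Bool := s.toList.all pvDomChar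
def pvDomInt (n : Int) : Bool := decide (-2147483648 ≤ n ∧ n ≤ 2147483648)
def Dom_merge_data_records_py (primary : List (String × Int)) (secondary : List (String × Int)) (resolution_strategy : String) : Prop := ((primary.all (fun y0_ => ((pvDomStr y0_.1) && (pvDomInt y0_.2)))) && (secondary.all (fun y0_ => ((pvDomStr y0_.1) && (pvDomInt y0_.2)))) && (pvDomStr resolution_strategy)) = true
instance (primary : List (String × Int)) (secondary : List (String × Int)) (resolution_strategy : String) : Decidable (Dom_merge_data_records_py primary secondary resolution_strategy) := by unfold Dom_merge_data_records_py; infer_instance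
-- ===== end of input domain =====

-- B replaces A's single merge loop (with per-key strategy branching) by a staged algorithm:
-- build a winning-value index over the concatenated items (direction chosen by the strategy),
-- then emit keys in first-occurrence order. Objective: alternative decomposition, same cost.


-- ===== PORT A =====
-- merged = primary.copy(); for key, value in secondary.items(): branches; return merged
def merge_data_records_py (primary : List (String × Int)) (secondary : List (String × Int)) (resolution_strategy : String) : List (String × Int) :=
  let merged : PySem.Dict String Int := PySem.Dict.ofList primary
  let merged :=
    (PySem.Dict.ofList secondary).items.foldl (fun m kv =>
      if !(m.contains kv.1) then m.insert kv.1 kv.2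
      else
        if resolution_strategy == "most_recent_wins" then m.insert kv.1 kv.2
        else if resolution_strategy == "highest_confidence" then m
        else if resolution_strategy == "source_priority" then m
        else m) merged
  merged.items

-- ===== PORT B =====
-- items = primary items ++ secondary items; winner = {} filled from items (forward for
-- most_recent_wins, reversed otherwise); merged = {} keyed by first occurrence, value winner[k].
-- winner[k] in Python cannot raise (every key of items is in winner), ported as get? + getD 0.
def merge_data_records_py_alt (primary : List (String × Int)) (secondary : List (String × Int)) (resolution_strategy : String) : List (String × Int) :=
  let items := (PySem.Dict.ofList primary).items ++ (PySem.Dict.ofList secondary).items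
  let source := if resolution_strategy == "most_recent_wins" then items else items.reverse
  let winner := source.foldl (fun d kv => d.insert kv.1 kv.2) (PySem.Dict.empty)
  let merged := items.foldl (fun d kv =>
    if !(d.contains kv.1) then d.insert kv.1 ((winner.get? kv.1).getD 0) else d)
    (PySem.Dict.empty)
  merged.items

-- ===== PRECONDITION & SPEC =====
def Spec_merge_data_records_py (primary : List (String × Int)) (secondary : List (String × Int)) (resolution_strategy : String) (out : List (String × Int)) : Prop := out = merge_data_records_py_alt primary secondary resolution_strategy
instance (primary : List (String × Int)) (secondary : List (String × Int)) (resolution_strategy : String) (out : List (String × Int)) : Decidable (Spec_merge_data_records_py primary secondary resolution_strategy out) := by unfold Spec_merge_data_records_py; infer_instance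

-- ===== CLAIM (what is proved, stated in full; the proofs are below) =====
def Claim_equal_merge_data_records_py : Prop := ∀ (primary : List (String × Int)) (secondary : List (String × Int)) (resolution_strategy : String), Dom_merge_data_records_py primary secondary resolution_strategy → Spec_merge_data_records_py primary secondary resolution_strategy (merge_data_records_py primary secondary resolution_strategy)

-- ===== LEMMAS AND PROOFS =====

-- A keep-first fold (skip keys already present), inserted value a function of the pair.
theorem foldl_keep_gen (g : String × Int → Int) (l : List (String × Int))
    (d : PySem.Dict String Int) (h : (l.map Prod.fst).Nodup) :
    (l.foldl (fun m kv => if !(m.contains kv.1) then m.insert kv.1 (g kv) else m) d).items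
      = d.items ++ (l.filter (fun kv => !(d.contains kv.1))).map (fun kv => (kv.1, g kv)) := by
  induction l generalizing d with
  | nil => simp
  | cons kv l ih =>
    rw [List.map_cons, List.nodup_cons] at h
    obtain ⟨hk, hnd⟩ := h
    by_cases hc : d.contains kv.1
    · simp only [List.foldl_cons, hc, Bool.not_true, Bool.false_eq_true, if_false]
      rw [ih _ hnd, List.filter_cons]
      simp [hc]
    · simp only [List.foldl_cons, hc, Bool.not_false, if_true]
      rw [ih _ hnd, PySem.Dict.items_insert_of_not_contains _ _ (by simpa using hc),
        List.filter_cons]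
      have hfilt : l.filter (fun kv' => !((d.insert kv.1 (g kv)).contains kv'.1))
          = l.filter (fun kv' => !(d.contains kv'.1)) := by
        apply List.filter_congr
        intro x hx
        have hxk : x.1 ≠ kv.1 := fun he => hk (he ▸ List.mem_map_of_mem (f := Prod.fst) hx)
        simp [PySem.Dict.contains_insert, hxk]
      rw [hfilt]
      simp [hc]

-- A's loop when secondary always wins: overwrite primary's values in place, append fresh keys.
theorem foldl_override (l : List (String × Int)) (d : PySem.Dict String Int)
    (h : (l.map Prod.fst).Nodup) :
    (l.foldl (fun m kv => m.insert kv.1 kv.2) d).items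
      = d.items.map (fun kv => (kv.1, (PySem.Dict.mk l).getD kv.1 kv.2))
        ++ l.filter (fun kv => !(d.contains kv.1)) := by
  induction l generalizing d with
  | nil =>
    simp [PySem.Dict.getD, PySem.Dict.get?]
  | cons kv l ih =>
    rw [List.map_cons, List.nodup_cons] at h
    obtain ⟨hk, hnd⟩ := h
    have hknotin : (PySem.Dict.mk l).contains kv.1 = false := by
      rw [PySem.Dict.contains_eq_decide_mem_keys]
      simp only [decide_eq_false_iff_not, PySem.Dict.keys_mk]
      exact fun hm => hk hm
    have hgetD : ∀ (x : String) (v0 : Int),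
        (PySem.Dict.mk (kv :: l)).getD x v0
          = if x = kv.1 then kv.2 else (PySem.Dict.mk l).getD x v0 := by
      intro x v0
      rw [PySem.Dict.getD_eq_get?_getD, PySem.Dict.get?_mk_cons, PySem.Dict.getD_eq_get?_getD]
      by_cases hx : x = kv.1
      · subst hx; simp
      · have hne : (kv.1 == x) = false := beq_eq_false_iff_ne.2 (Ne.symm hx)
        simp [hne, hx]
    have hval : (PySem.Dict.mk l).getD kv.1 kv.2 = kv.2 :=
      PySem.Dict.getD_of_not_contains _ _ hknotin
    rw [List.foldl_cons, ih _ hnd]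
    by_cases hc : d.contains kv.1
    · rw [PySem.Dict.items_insert_of_contains _ _ hc, List.map_map, List.filter_cons]
      have hmap : d.items.map ((fun p => (p.1, (PySem.Dict.mk l).getD p.1 p.2)) ∘
            (fun p => if p.1 == kv.1 then (kv.1, kv.2) else p))
          = d.items.map (fun p => (p.1, (PySem.Dict.mk (kv :: l)).getD p.1 p.2)) := by
        apply List.map_congr_left
        intro p _
        by_cases hp : p.1 = kv.1
        · simp [Function.comp, hp, hgetD, hval]
        · simp [Function.comp, hp, hgetD]
      have hfilt : l.filter (fun kv' => !((d.insert kv.1 kv.2).contains kv'.1))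
          = l.filter (fun kv' => !(d.contains kv'.1)) := by
        apply List.filter_congr
        intro x hx
        have hxk : x.1 ≠ kv.1 := fun he => hk (he ▸ List.mem_map_of_mem (f := Prod.fst) hx)
        simp [PySem.Dict.contains_insert, hxk]
      rw [hmap, hfilt]
      simp [hc]
    · have hcb : d.contains kv.1 = false := by simpa using hc
      rw [PySem.Dict.items_insert_of_not_contains _ _ hcb, List.map_append, List.filter_cons]
      have hmap : d.items.map (fun p => (p.1, (PySem.Dict.mk l).getD p.1 p.2))
          = d.items.map (fun p => (p.1, (PySem.Dict.mk (kv :: l)).getD p.1 p.2)) := by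
        apply List.map_congr_left
        intro p hp
        have hpk : p.1 ≠ kv.1 := by
          intro he
          have : kv.1 ∈ d.keys := by
            rw [← he]; exact PySem.Dict.mem_keys_of_mem_items _ hp
          rw [PySem.Dict.contains_eq_decide_mem_keys] at hcb
          simp only [decide_eq_false_iff_not] at hcb
          exact hcb this
        simp [hgetD, hpk]
      have hfilt : l.filter (fun kv' => !((d.insert kv.1 kv.2).contains kv'.1))
          = l.filter (fun kv' => !(d.contains kv'.1)) := by
        apply List.filter_congr
        intro x hx
        have hxk : x.1 ≠ kv.1 := fun he => hk (he ▸ List.mem_map_of_mem (f := Prod.fst) hx)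
        simp [PySem.Dict.contains_insert, hxk]
      rw [hmap, hfilt]
      simp [hcb, hgetD, hknotin, PySem.Dict.getD_of_not_contains]

-- B's index pass: a plain insert-fold answers lookups by the LAST matching pair.
theorem get?_foldl_insert (l : List (String × Int)) (d : PySem.Dict String Int) (k : String) :
    (l.foldl (fun d kv => d.insert kv.1 kv.2) d).get? k
      = ((l.reverse.find? (fun kv => kv.1 == k)).map Prod.snd).or (d.get? k) := by
  induction l generalizing d with
  | nil => simp
  | cons kv l ih =>
    rw [List.foldl_cons, ih, List.reverse_cons, List.find?_append]
    cases hf : l.reverse.find? (fun kv => kv.1 == k) with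
    | some q => simp [Option.or]
    | none =>
      by_cases hk : kv.1 = k
      · subst hk; simp [List.find?, PySem.Dict.get?_insert_self, Option.or]
      · have hne : (kv.1 == k) = false := beq_eq_false_iff_ne.2 hk
        simp [List.find?, hne, PySem.Dict.get?_insert_of_ne _ _ (Ne.symm hk), Option.or]

-- On a key-nodup list, find?-by-key returns the unique member with that key.
theorem find?_key_of_mem (l : List (String × Int)) (kv : String × Int)
    (h : (l.map Prod.fst).Nodup) (hm : kv ∈ l) :
    l.find? (fun p => p.1 == kv.1) = some kv := by
  induction l with
  | nil => cases hm
  | cons a l ih =>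
    rw [List.map_cons, List.nodup_cons] at h
    obtain ⟨hk, hnd⟩ := h
    rcases List.mem_cons.1 hm with rfl | hm'
    · simp [List.find?]
    · have hne : (a.1 == kv.1) = false := by
        apply beq_eq_false_iff_ne.2
        intro he
        exact hk (he ▸ List.mem_map_of_mem (f := Prod.fst) hm')
      simp only [List.find?, hne]
      exact ih hnd hm'

theorem find?_key_eq_none (l : List (String × Int)) (k : String)
    (h : k ∉ l.map Prod.fst) :
    l.find? (fun p => p.1 == k) = none := by
  apply List.find?_eq_none.2
  intro x hx hpx
  have hxk : x.1 = k := by simpa using hpx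
  exact h (hxk ▸ List.mem_map_of_mem (f := Prod.fst) hx)

-- ===== VERDICT (by name: the statement is the Claim_ definition above) =====
theorem merge_data_records_py_spec : Claim_equal_merge_data_records_py := by
  intro primary secondary resolution_strategy _
  unfold Spec_merge_data_records_py
  simp only [merge_data_records_py, merge_data_records_py_alt]
  have hp : ((PySem.Dict.ofList primary).items.map Prod.fst).Nodup :=
    PySem.Dict.nodup_keys_ofList primary
  have hs : ((PySem.Dict.ofList secondary).items.map Prod.fst).Nodup :=
    PySem.Dict.nodup_keys_ofList secondary
  set p := (PySem.Dict.ofList primary).items with hpdef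
  set s := (PySem.Dict.ofList secondary).items with hsdef
  have hPcont : ∀ k, (PySem.Dict.ofList primary).contains k = decide (k ∈ p.map Prod.fst) := by
    intro k
    rw [PySem.Dict.contains_eq_decide_mem_keys]
    rfl
  -- B's dedup pass, for ANY winner dict w
  have hB : ∀ (w : PySem.Dict String Int),
      ((p ++ s).foldl (fun d kv =>
        if !(d.contains kv.1) then d.insert kv.1 ((w.get? kv.1).getD 0) else d)
        PySem.Dict.empty).items
      = p.map (fun kv => (kv.1, (w.get? kv.1).getD 0))
        ++ (s.filter (fun kv => !((PySem.Dict.ofList primary).contains kv.1))).map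
            (fun kv => (kv.1, (w.get? kv.1).getD 0)) := by
    intro w
    rw [List.foldl_append]
    rw [foldl_keep_gen (fun kv => (w.get? kv.1).getD 0) s _ hs]
    have hd1 : (p.foldl (fun d kv =>
        if !(d.contains kv.1) then d.insert kv.1 ((w.get? kv.1).getD 0) else d)
        PySem.Dict.empty).items = p.map (fun kv => (kv.1, (w.get? kv.1).getD 0)) := by
      rw [foldl_keep_gen (fun kv => (w.get? kv.1).getD 0) p _ hp]
      simp [PySem.Dict.contains_empty]
      rfl
    have hd1c : ∀ k, (p.foldl (fun d kv =>
        if !(d.contains kv.1) then d.insert kv.1 ((w.get? kv.1).getD 0) else d)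
        PySem.Dict.empty).contains k = (PySem.Dict.ofList primary).contains k := by
      intro k
      rw [PySem.Dict.contains_eq_decide_mem_keys, hPcont]
      congr 1
      show (k ∈ _) = (k ∈ p.map Prod.fst)
      congr 1
      show List.map Prod.fst _ = _
      rw [hd1, List.map_map]
      rfl
    rw [hd1]
    congr 1
    congr 1
    apply List.filter_congr
    intro x _
    rw [hd1c]
  -- the winner lookup is the LAST match of the source list
  have hW : ∀ (l : List (String × Int)) (k : String),
      ((l.foldl (fun d kv => d.insert kv.1 kv.2) PySem.Dict.empty).get? k)
        = (l.reverse.find? (fun kv => kv.1 == k)).map Prod.snd := by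
    intro l k
    rw [get?_foldl_insert]
    simp
  by_cases hrs : resolution_strategy = "most_recent_wins"
  · -- secondary wins on conflict
    subst hrs
    simp only [beq_self_eq_true, if_true, ite_self]
    rw [foldl_override s _ hs, hB]
    congr 1
    · -- primary keys carry S's value when present, else their own
      apply List.map_congr_left
      intro kv hkv
      rw [hW, List.reverse_append]
      by_cases hmem : kv.1 ∈ s.map Prod.fst
      · obtain ⟨q, hq, hq1⟩ := List.mem_map.1 hmem
        have hnds : (s.reverse.map Prod.fst).Nodup := by
          rw [List.map_reverse]; exact List.nodup_reverse.mpr hs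
        have hfind : s.reverse.find? (fun pr => pr.1 == q.1) = some q :=
          find?_key_of_mem s.reverse q hnds (List.mem_reverse.2 hq)
        rw [hq1] at hfind
        rw [List.find?_append, hfind]
        have hqmem : (kv.1, q.2) ∈ s := by
          rw [← hq1]
          simpa using hq
        have hgood : (PySem.Dict.mk s).getD kv.1 kv.2 = q.2 := by
          apply PySem.Dict.getD_of_mem_items
          · exact hqmem
          · exact hs
        simp [Option.or, hgood]
      · have hnone : s.reverse.find? (fun pr => pr.1 == kv.1) = none := by
          apply find?_key_eq_none
          rw [List.map_reverse, List.mem_reverse]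
          exact hmem
        have hndp : (p.reverse.map Prod.fst).Nodup := by
          rw [List.map_reverse]; exact List.nodup_reverse.mpr hp
        have hfind : p.reverse.find? (fun pr => pr.1 == kv.1) = some kv :=
          find?_key_of_mem p.reverse kv hndp (List.mem_reverse.2 hkv)
        rw [List.find?_append, hnone, hfind]
        have hnc : (PySem.Dict.mk s).contains kv.1 = false := by
          rw [PySem.Dict.contains_eq_decide_mem_keys]
          simpa using hmem
        simp [Option.or, PySem.Dict.getD_of_not_contains _ _ hnc]
    · -- secondary-only keys keep their own value
      symm
      rw [show (s.filter (fun kv => !((PySem.Dict.ofList primary).contains kv.1))).map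
            (fun kv => (kv.1, (((p ++ s).foldl (fun d kv => d.insert kv.1 kv.2)
              PySem.Dict.empty).get? kv.1).getD 0))
          = (s.filter (fun kv => !((PySem.Dict.ofList primary).contains kv.1))).map id from ?_,
        List.map_id]
      apply List.map_congr_left
      intro kv hkv
      have hkvs : kv ∈ s := (List.mem_filter.1 hkv).1
      rw [hW, List.reverse_append]
      have hnds : (s.reverse.map Prod.fst).Nodup := by
        rw [List.map_reverse]; exact List.nodup_reverse.mpr hs
      have hfind : s.reverse.find? (fun pr => pr.1 == kv.1) = some kv :=
        find?_key_of_mem s.reverse kv hnds (List.mem_reverse.2 hkvs)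
      rw [List.find?_append, hfind]
      simp [Option.or]
  · -- every other strategy: primary wins on conflict
    have hbe : (resolution_strategy == "most_recent_wins") = false :=
      beq_eq_false_iff_ne.2 hrs
    simp only [hbe, Bool.false_eq_true, if_false, ite_self]
    rw [foldl_keep_gen Prod.snd s _ hs, hB]
    congr 1
    · -- primary items are unchanged
      symm
      rw [show p.map (fun kv => (kv.1, (((p ++ s).reverse.foldl (fun d kv => d.insert kv.1 kv.2)
            PySem.Dict.empty).get? kv.1).getD 0)) = p.map id from ?_, List.map_id]
      apply List.map_congr_left
      intro kv hkv
      rw [hW]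
      rw [List.reverse_reverse, List.find?_append,
        find?_key_of_mem p kv hp hkv]
      simp [Option.or]
    · -- secondary-only keys keep their own value; A's map is the identity too
      have hA : (s.filter (fun kv => !((PySem.Dict.ofList primary).contains kv.1))).map
          (fun kv => (kv.1, kv.2)) = s.filter (fun kv => !((PySem.Dict.ofList primary).contains kv.1)) := by
        simp
      rw [hA]
      symm
      rw [show (s.filter (fun kv => !((PySem.Dict.ofList primary).contains kv.1))).map
            (fun kv => (kv.1, (((p ++ s).reverse.foldl (fun d kv => d.insert kv.1 kv.2)
              PySem.Dict.empty).get? kv.1).getD 0))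
          = (s.filter (fun kv => !((PySem.Dict.ofList primary).contains kv.1))).map id from ?_,
        List.map_id]
      apply List.map_congr_left
      intro kv hkv
      obtain ⟨hkvs, hkc⟩ := List.mem_filter.1 hkv
      have hnp : kv.1 ∉ p.map Prod.fst := by
        rw [hPcont] at hkc
        simpa using hkc
      rw [hW, List.reverse_reverse, List.find?_append, find?_key_eq_none p kv.1 hnp]
      rw [find?_key_of_mem s kv hs hkvs]
      simp [Option.or]
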